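-- pv_equiv track=rewrite | github.com/Srilekha-03/DSA | Difficulty: Medium/Minimal Cost/minimal-cost.py | minimizeCost
-- ===== SOURCE A (Python) =====
-- def minimizeCost(k, arr):
--     dp=[0]*len(arr)
--     dp[0]=0
--     for i in range(1,len(arr)):
--         mini=float('inf')
--         for j in range(1,k+1):
--             if i-j>=0:
--                 jump=dp[i-j]+abs(arr[i]-arr[i-j])
--                 mini=min(mini,jump)
--         dp[i]=mini
--     return dp[-1]
-- ===== SOURCE B (Python) =====
-- def minimizeCost(k, arr):
--     # Top-down, demand-driven memoized evaluation of the jump recurrence,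
--     # driven by an explicit stack (no recursion limit issues).
--     n = len(arr)
--     memo = {0: 0}
--     stack = [n - 1]
--     while stack:
--         i = stack[-1]
--         if i in memo:
--             stack.pop()
--             continue
--         pending = [i - j for j in range(1, k + 1) if i - j >= 0 and i - j not in memo]
--         if pending:
--             stack.extend(pending)
--         else:
--             m = float('inf')
--             for j in range(1, k + 1):
--                 if i - j >= 0:
--                     m = min(m, memo[i - j] + abs(arr[i] - arr[i - j]))
--             memo[i] = m
--             stack.pop()
--     return memo[n - 1]
-- ===== Notes on version B (the rewrite author's own statement) =====
-- stated objective: alternative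
-- what changed: Replaced the bottom-up table DP (index loop filling a dp array left to right) by demand-driven top-down memoized evaluation: an explicit work stack and a dict memo compute each subproblem only when it is demanded, starting from the target index n-1.
-- outside the precondition, e.g. on minimizeCost(0, [1, 2]): A returns inf, B returns inf; on minimizeCost(2, []): A raises IndexError, B returns inf
import Mathlib
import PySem

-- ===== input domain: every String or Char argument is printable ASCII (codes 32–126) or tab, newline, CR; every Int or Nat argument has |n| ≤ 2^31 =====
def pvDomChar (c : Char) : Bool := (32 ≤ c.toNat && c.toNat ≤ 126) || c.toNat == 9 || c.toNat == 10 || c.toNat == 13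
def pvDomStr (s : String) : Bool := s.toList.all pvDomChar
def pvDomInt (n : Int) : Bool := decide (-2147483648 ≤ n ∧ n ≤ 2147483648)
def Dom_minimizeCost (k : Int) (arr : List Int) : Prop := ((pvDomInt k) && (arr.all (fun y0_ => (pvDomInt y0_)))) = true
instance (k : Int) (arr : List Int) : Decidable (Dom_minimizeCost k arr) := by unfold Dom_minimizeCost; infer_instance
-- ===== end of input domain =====

-- B replaces A's bottom-up table DP by demand-driven top-down memoized evaluation
-- (an explicit work stack plus a dict memo, starting from the target index n-1);
-- same O(n*k) cost, a different algorithmic decomposition and data structures.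

-- ===== PORT A =====
-- Option Int models Python's numbers-with-infinity here: none = float('inf'), some v = int v.
def omin : Option Int → Option Int → Option Int
  | none, b => b
  | some a, none => some a
  | some a, some b => some (min a b)

def oadd : Option Int → Int → Option Int
  | none, _ => none
  | some a, x => some (a + x)

-- A's inner 'for j in range(1, k+1)' loop computing mini (starts at float('inf') = none)
def miniOf (k : Int) (arr : List Int) (dp : List (Option Int)) (i : Int) : Option Int :=
  (PySem.List.pyRange 1 (k + 1) 1).foldl (fun mini j =>
    if i - j ≥ 0 then
      omin mini (oadd (dp.getD (i - j).toNat none) |arr.getD i.toNat 0 - arr.getD (i - j).toNat 0|)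
    else mini) none

def minimizeCost (k : Int) (arr : List Int) : Int :=
  -- dp = [0]*len(arr); dp[0] = 0
  let dp : List (Option Int) := (List.replicate arr.length (some (0 : Int))).set 0 (some 0)
  -- for i in range(1, len(arr)): dp[i] = mini
  let dp := (PySem.List.pyRange 1 (arr.length : Int) 1).foldl
      (fun dp i => dp.set i.toNat (miniOf k arr dp i)) dp
  -- return dp[-1]  (unwrap: outside Pre_ the Python value is float('inf') / IndexError)
  ((PySem.List.pyGet? dp (-1)).getD none).getD 0

-- ===== PORT B =====
-- B's pending = [i - j for j in range(1, k+1) if i - j >= 0 and i - j not in memo]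
def pendingOf (k : Int) (memo : PySem.Dict Int (Option Int)) (i : Int) : List Int :=
  (PySem.List.pyRange 1 (k + 1) 1).filterMap (fun j =>
    if i - j ≥ 0 ∧ PySem.Dict.contains memo (i - j) = false then some (i - j) else none)

-- B's finalization loop: m = min over children of memo[i-j] + abs(arr[i]-arr[i-j])
-- (memo lookup via getD _ none: when this branch runs, every child is present in memo)
def finVal (k : Int) (arr : List Int) (memo : PySem.Dict Int (Option Int)) (i : Int) : Option Int :=
  (PySem.List.pyRange 1 (k + 1) 1).foldl (fun m j =>
    if i - j ≥ 0 then
      omin m (oadd (PySem.Dict.getD memo (i - j) none) |arr.getD i.toNat 0 - arr.getD (i - j).toNat 0|)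
    else m) none

-- B's 'while stack:' loop; the Lean list's HEAD is the Python stack's TOP
-- (stack[-1]/pop read the head; stack.extend(pending) is pending.reverse ++ stack).
-- Fuel only makes the recursion structural; the proof shows the given fuel suffices.
def runB (k : Int) (arr : List Int) :
    Nat → PySem.Dict Int (Option Int) × List Int → PySem.Dict Int (Option Int) × List Int
  | 0, s => s
  | _ + 1, (memo, []) => (memo, [])
  | f + 1, (memo, i :: st) =>
    if PySem.Dict.contains memo i then runB k arr f (memo, st)
    else
      let pending := pendingOf k memo i
      if pending.isEmpty then
        runB k arr f (PySem.Dict.insert memo i (finVal k arr memo i), st)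
      else
        runB k arr f (memo, pending.reverse ++ (i :: st))

def minimizeCost_alt (k : Int) (arr : List Int) : Int :=
  let n : Int := (arr.length : Int)
  -- memo = {0: 0}; stack = [n - 1]
  let memo0 : PySem.Dict Int (Option Int) := PySem.Dict.insert PySem.Dict.empty 0 (some 0)
  let fuel : Nat := (arr.length + 1) * (k.toNat + 2) + 2
  let res := runB k arr fuel (memo0, [n - 1])
  -- return memo[n - 1]
  ((PySem.Dict.get? res.1 (n - 1)).getD none).getD 0

-- ===== PRECONDITION & SPEC =====
-- Pre_ excludes (a) empty arr, where A raises IndexError, and (b) k < 1 with 2 or more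
-- elements, where A returns float('inf') — a float, not a value of the declared Int type.
def Pre_minimizeCost (k : Int) (arr : List Int) : Prop :=
  arr ≠ [] ∧ (1 ≤ k ∨ arr.length = 1)
instance (k : Int) (arr : List Int) : Decidable (Pre_minimizeCost k arr) := by
  unfold Pre_minimizeCost; infer_instance

def pvWitness_minimizeCost : Int × List Int := (2, [1, 3, 2])

def Spec_minimizeCost (k : Int) (arr : List Int) (out : Int) : Prop := out = minimizeCost_alt k arr
instance (k : Int) (arr : List Int) (out : Int) : Decidable (Spec_minimizeCost k arr out) := by
  unfold Spec_minimizeCost; infer_instance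

-- ===== CLAIM (what is proved, stated in full; the proofs are below) =====
def Claim_equal_minimizeCost : Prop := ∀ (k : Int) (arr : List Int), Dom_minimizeCost k arr → Pre_minimizeCost k arr → Spec_minimizeCost k arr (minimizeCost k arr)

-- ===== LEMMAS AND PROOFS =====

-- the finalized dp values of indices 0..m (the list A's loop builds)
def Dl (k : Int) (arr : List Int) : Nat → List (Option Int)
  | 0 => [some 0]
  | m + 1 => Dl k arr m ++ [miniOf k arr (Dl k arr m) ((m : Int) + 1)]

theorem length_Dl (k : Int) (arr : List Int) (m : Nat) : (Dl k arr m).length = m + 1 := by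
  induction m with
  | zero => rfl
  | succ m ih => simp [Dl, ih]

theorem getD_Dl_mono (k : Int) (arr : List Int) (t m' m : Nat) (h1 : t ≤ m') (h2 : m' ≤ m) :
    (Dl k arr m).getD t none = (Dl k arr m').getD t none := by
  induction m with
  | zero =>
    have : m' = 0 := by omega
    subst this; rfl
  | succ m ih =>
    by_cases hm : m' = m + 1
    · subst hm; rfl
    · have hle : m' ≤ m := by omega
      rw [← ih hle]
      show (Dl k arr m ++ [_]).getD t none = (Dl k arr m).getD t none
      rw [List.getD_eq_getElem?_getD, List.getD_eq_getElem?_getD,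
        List.getElem?_append_left (by rw [length_Dl]; omega)]

theorem getD_Dl_zero (k : Int) (arr : List Int) (m : Nat) : (Dl k arr m).getD 0 none = some 0 := by
  rw [getD_Dl_mono k arr 0 0 m (le_refl 0) (Nat.zero_le m)]; rfl

theorem getD_Dl_succ (k : Int) (arr : List Int) (t m : Nat) (h1 : 1 ≤ t) (h2 : t ≤ m) :
    (Dl k arr m).getD t none = miniOf k arr (Dl k arr (t - 1)) (t : Int) := by
  rw [getD_Dl_mono k arr t t m (le_refl t) h2]
  obtain ⟨u, rfl⟩ : ∃ u, t = u + 1 := ⟨t - 1, by omega⟩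
  have hl := length_Dl k arr u
  have hcast : (((u + 1 : Nat)) : Int) = (u : Int) + 1 := by push_cast; ring
  show (Dl k arr u ++ [miniOf k arr (Dl k arr u) ((u : Int) + 1)]).getD (u+1) none = _
  rw [List.getD_eq_getElem?_getD, List.getElem?_append_right (by omega)]
  simp [hl, hcast]

theorem miniOf_congr (k : Int) (arr : List Int) (d1 d2 : List (Option Int)) (i : Int)
    (h : ∀ u : Nat, (u : Int) < i → d1.getD u none = d2.getD u none) :
    miniOf k arr d1 i = miniOf k arr d2 i := by
  unfold miniOf
  apply PySem.List.foldl_congr_mem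
  intro acc j hjmem
  have hj1 : 1 ≤ j := ((PySem.List.mem_pyRange_one).1 hjmem).1
  by_cases hij : i - j ≥ 0
  · have : ((i - j).toNat : Int) < i := by omega
    rw [if_pos hij, if_pos hij, h _ this]
  · rw [if_neg hij, if_neg hij]

theorem getD_append_left {α : Type} (l1 l2 : List α) (d : α) (u : Nat) (h : u < l1.length) :
    (l1 ++ l2).getD u d = l1.getD u d := by
  rw [List.getD_eq_getElem?_getD, List.getD_eq_getElem?_getD, List.getElem?_append_left h]

theorem set_append_length {α : Type} (l1 l2 : List α) (v : α) :
    (l1 ++ l2).set l1.length v = l1 ++ l2.set 0 v := by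
  induction l1 with
  | nil => rfl
  | cons a l ih =>
    show a :: (l ++ l2).set l.length v = a :: (l ++ l2.set 0 v)
    rw [ih]

-- A's loop builds Dl
theorem A_loop (k : Int) (arr : List Int) (hne : arr ≠ []) (m : Nat) (hm : m ≤ arr.length - 1) :
    (PySem.List.pyRange 1 ((m : Int) + 1) 1).foldl
        (fun dp i => dp.set i.toNat (miniOf k arr dp i))
        ((List.replicate arr.length (some (0 : Int))).set 0 (some 0))
      = Dl k arr m ++ List.replicate (arr.length - 1 - m) (some 0) := by
  induction m with
  | zero =>
    rw [Nat.cast_zero, zero_add, PySem.List.pyRange_one_eq_nil (le_refl 1)]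
    cases arr with
    | nil => exact absurd rfl hne
    | cons a l => simp [Dl, List.replicate_succ]
  | succ m ih =>
    have hm' : m ≤ arr.length - 1 := by omega
    rw [show (((m + 1 : Nat)) : Int) + 1 = ((m : Int) + 1) + 1 by push_cast; ring,
      PySem.List.pyRange_one_succ_right (by omega), List.foldl_append, ih hm']
    simp only [List.foldl_cons, List.foldl_nil]
    have hlen := length_Dl k arr m
    have htn : ((m : Int) + 1).toNat = m + 1 := by omega
    have hmini : miniOf k arr (Dl k arr m ++ List.replicate (arr.length - 1 - m) (some 0)) ((m : Int) + 1)
        = miniOf k arr (Dl k arr m) ((m : Int) + 1) :=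
      miniOf_congr k arr _ _ _ (fun u hu => getD_append_left _ _ _ _ (by omega))
    rw [hmini, htn]
    have hset := set_append_length (Dl k arr m) (List.replicate (arr.length - 1 - m) (some (0 : Int)))
      (miniOf k arr (Dl k arr m) ((m : Int) + 1))
    rw [hlen] at hset
    rw [hset]
    have hrep : List.replicate (arr.length - 1 - m) (some (0 : Int))
        = some 0 :: List.replicate (arr.length - 1 - (m + 1)) (some 0) := by
      rw [← List.replicate_succ]
      congr 1
      omega
    rw [hrep]
    show Dl k arr m ++ (miniOf k arr (Dl k arr m) ((m : Int) + 1)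
        :: List.replicate (arr.length - 1 - (m + 1)) (some 0)) = _
    rw [Dl]
    simp

-- ===== B-side proof machinery =====

-- invariant: memo holds index 0, and every memoized key is a valid index carrying
-- its finalized pull-DP value
def GoodM (k : Int) (arr : List Int) (memo : PySem.Dict Int (Option Int)) : Prop :=
  PySem.Dict.contains memo 0 = true ∧
  ∀ x, PySem.Dict.contains memo x = true →
    ∃ t : Nat, x = (t : Int) ∧ t < arr.length ∧
      PySem.Dict.get? memo x = some ((Dl k arr (arr.length - 1)).getD t none)

-- number of not-yet-memoized indices (the termination potential)
def UCount (n : Nat) (memo : PySem.Dict Int (Option Int)) : Nat :=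
  ((List.range n).filter (fun t : Nat => !(PySem.Dict.contains memo (t : Int)))).length

theorem UCount_le (n : Nat) (memo : PySem.Dict Int (Option Int)) : UCount n memo ≤ n := by
  unfold UCount
  exact le_trans (List.length_filter_le _ _) (by simp)

theorem filter_length_strict {α : Type} (p q : α → Bool) (t : α) :
    ∀ l : List α, (∀ a ∈ l, q a = true → p a = true) → t ∈ l → p t = true → q t = false →
      (l.filter q).length < (l.filter p).length := by
  intro l
  induction l with
  | nil => intro _ ht; cases ht
  | cons a l ih =>
    intro h ht hp hq
    have hmonol : (l.filter q).length ≤ (l.filter p).length := by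
      rw [← List.countP_eq_length_filter, ← List.countP_eq_length_filter]
      exact List.countP_mono_left (fun a ha => h a (List.mem_cons_of_mem _ ha))
    rcases List.mem_cons.1 ht with rfl | hmem
    · rw [List.filter_cons_of_pos hp, List.filter_cons_of_neg (by simp [hq])]
      simpa using Nat.lt_succ_of_le hmonol
    · have hlt := ih (fun a ha => h a (List.mem_cons_of_mem _ ha)) hmem hp hq
      cases hqa : q a with
      | true =>
        have hpa := h a List.mem_cons_self hqa
        rw [List.filter_cons_of_pos hpa, List.filter_cons_of_pos hqa]
        simpa using hlt
      | false =>
        rw [List.filter_cons_of_neg (by simp [hqa])]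
        cases hpa : p a with
        | true =>
          rw [List.filter_cons_of_pos hpa]
          exact Nat.lt_succ_of_lt hlt
        | false =>
          rw [List.filter_cons_of_neg (by simp [hpa])]
          exact hlt

theorem UCount_insert_fresh (n : Nat) (memo : PySem.Dict Int (Option Int)) (t : Nat) (v : Option Int)
    (htn : t < n) (hfresh : PySem.Dict.contains memo (t : Int) = false) :
    UCount n (PySem.Dict.insert memo (t : Int) v) + 1 ≤ UCount n memo := by
  apply Nat.succ_le_of_lt
  unfold UCount
  apply filter_length_strict _ _ t _ ?_ (List.mem_range.2 htn) (by simp [hfresh]) ?_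
  · intro a _
    simp only [Bool.not_eq_true']
    intro ha
    cases hc : PySem.Dict.contains memo (a : Int) with
    | false => rfl
    | true =>
      exfalso
      have : PySem.Dict.contains (PySem.Dict.insert memo (t : Int) v) (a : Int) = true := by
        rw [PySem.Dict.contains_insert]
        simp [hc]
      rw [this] at ha; cases ha
  · simp [PySem.Dict.contains_insert_self]

theorem runB_nil (k : Int) (arr : List Int) (g : Nat) (memo : PySem.Dict Int (Option Int)) :
    runB k arr g (memo, []) = (memo, []) := by
  cases g <;> rfl

theorem runB_succ (k : Int) (arr : List Int) (f : Nat) (memo : PySem.Dict Int (Option Int))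
    (i : Int) (st : List Int) :
    runB k arr (f + 1) (memo, i :: st) =
      if PySem.Dict.contains memo i then runB k arr f (memo, st)
      else if (pendingOf k memo i).isEmpty then
        runB k arr f (PySem.Dict.insert memo i (finVal k arr memo i), st)
      else
        runB k arr f (memo, (pendingOf k memo i).reverse ++ (i :: st)) := rfl

theorem mem_pendingOf (k : Int) (memo : PySem.Dict Int (Option Int)) (i c : Int) :
    c ∈ pendingOf k memo i ↔ ∃ j, j ∈ PySem.List.pyRange 1 (k + 1) 1 ∧ c = i - j ∧
      0 ≤ i - j ∧ PySem.Dict.contains memo (i - j) = false := by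
  unfold pendingOf
  rw [List.mem_filterMap]
  constructor
  · rintro ⟨j, hj, hsome⟩
    by_cases h : i - j ≥ 0 ∧ PySem.Dict.contains memo (i - j) = false
    · rw [if_pos h] at hsome
      exact ⟨j, hj, (Option.some_inj.1 hsome).symm, h.1, h.2⟩
    · rw [if_neg h] at hsome; cases hsome
  · rintro ⟨j, hj, rfl, h1, h2⟩
    exact ⟨j, hj, by rw [if_pos ⟨h1, h2⟩]⟩

theorem length_pendingOf_le (k : Int) (memo : PySem.Dict Int (Option Int)) (i : Int) :
    (pendingOf k memo i).length ≤ k.toNat := by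
  unfold pendingOf
  refine le_trans (List.length_filterMap_le _ _) ?_
  rw [PySem.List.length_pyRange_one]
  omega

theorem GoodM_insert (k : Int) (arr : List Int) (memo : PySem.Dict Int (Option Int))
    (hg : GoodM k arr memo) (t : Nat) (htn : t < arr.length) (v : Option Int)
    (hv : v = (Dl k arr (arr.length - 1)).getD t none) :
    GoodM k arr (PySem.Dict.insert memo (t : Int) v) := by
  constructor
  · rw [PySem.Dict.contains_insert, hg.1]
    simp
  · intro x hx
    by_cases hxt : x = (t : Int)
    · exact ⟨t, hxt, htn, by rw [hxt, PySem.Dict.get?_insert_self, hv]⟩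
    · have hcx : PySem.Dict.contains memo x = true := by
        rw [PySem.Dict.contains_insert] at hx
        rcases Bool.or_eq_true_iff.1 hx with h | h
        · exact absurd (by exact_mod_cast eq_of_beq h) hxt
        · exact h
      obtain ⟨u, hux, hun, huv⟩ := hg.2 x hcx
      exact ⟨u, hux, hun, by rw [PySem.Dict.get?_insert, if_neg hxt]; exact huv⟩

theorem getD_of_GoodM (k : Int) (arr : List Int) (memo : PySem.Dict Int (Option Int))
    (hg : GoodM k arr memo) (x : Int) (hx : PySem.Dict.contains memo x = true) (hx0 : 0 ≤ x) :
    PySem.Dict.getD memo x none = (Dl k arr (arr.length - 1)).getD x.toNat none := by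
  obtain ⟨u, hux, hun, huv⟩ := hg.2 x hx
  rw [PySem.Dict.getD_eq_get?_getD, huv]
  subst hux
  simp

theorem finVal_eq (k : Int) (arr : List Int) (memo : PySem.Dict Int (Option Int)) (i : Nat)
    (hi : i < arr.length) (h1 : 1 ≤ i)
    (hch : ∀ j ∈ PySem.List.pyRange 1 (k + 1) 1, (i : Int) - j ≥ 0 →
      PySem.Dict.getD memo ((i : Int) - j) none
        = (Dl k arr (arr.length - 1)).getD ((i : Int) - j).toNat none) :
    finVal k arr memo (i : Int) = (Dl k arr (arr.length - 1)).getD i none := by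
  rw [getD_Dl_succ k arr i (arr.length - 1) h1 (by omega)]
  unfold finVal miniOf
  apply PySem.List.foldl_congr_mem
  intro acc j hjmem
  have hj1 : 1 ≤ j := ((PySem.List.mem_pyRange_one).1 hjmem).1
  by_cases hij : (i : Int) - j ≥ 0
  · rw [if_pos hij, if_pos hij, hch j hjmem hij,
      getD_Dl_mono k arr ((i : Int) - j).toNat (i - 1) (arr.length - 1) (by omega) (by omega)]
  · rw [if_neg hij, if_neg hij]

-- the one-subproblem simulation lemma: from a good memo, running the stack machine on
-- i (plus anything below) computes and memoizes dp[i] within (k+2)-per-new-entry fuel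
theorem run_one (k : Int) (arr : List Int) : ∀ i : Nat, i < arr.length →
    ∀ memo, GoodM k arr memo → ∃ f memo',
      f + (k.toNat + 2) * UCount arr.length memo' ≤ 1 + (k.toNat + 2) * UCount arr.length memo
      ∧ GoodM k arr memo'
      ∧ (∀ x, PySem.Dict.contains memo x = true → PySem.Dict.contains memo' x = true)
      ∧ (∀ x, PySem.Dict.contains memo' x = true →
          PySem.Dict.contains memo x = true ∨ ∃ t : Nat, t ≤ i ∧ x = (t : Int))
      ∧ PySem.Dict.contains memo' (i : Int) = true
      ∧ ∀ st g, runB k arr (f + g) (memo, (i : Int) :: st) = runB k arr g (memo', st) := by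
  intro i
  induction i using Nat.strong_induction_on with
  | _ i IH =>
  intro hi memo hg
  by_cases hc : PySem.Dict.contains memo (i : Int) = true
  · -- already memoized: one pop
    refine ⟨1, memo, by omega, hg, fun x h => h, fun x h => Or.inl h, hc, ?_⟩
    intro st g
    rw [Nat.add_comm, runB_succ, if_pos hc]
  · have hc' : PySem.Dict.contains memo (i : Int) = false := by
      revert hc; cases PySem.Dict.contains memo (i : Int) <;> simp
    have hi1 : 1 ≤ i := by
      rcases Nat.eq_zero_or_pos i with h0 | h0
      · exfalso; apply hc; rw [h0]; exact_mod_cast hg.1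
      · exact h0
    by_cases hpe : (pendingOf k memo (i : Int)).isEmpty
    · -- all children memoized: finalize directly
      have hchild : ∀ j ∈ PySem.List.pyRange 1 (k + 1) 1, (i : Int) - j ≥ 0 →
          PySem.Dict.contains memo ((i : Int) - j) = true := by
        intro j hj hij
        by_contra hcj
        have hcj' : PySem.Dict.contains memo ((i : Int) - j) = false := by
          revert hcj; cases PySem.Dict.contains memo ((i : Int) - j) <;> simp
        have : ((i : Int) - j) ∈ pendingOf k memo (i : Int) :=
          (mem_pendingOf k memo (i : Int) _).2 ⟨j, hj, rfl, hij, hcj'⟩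
        rw [List.isEmpty_iff.1 hpe] at this
        cases this
      have hval : finVal k arr memo (i : Int) = (Dl k arr (arr.length - 1)).getD i none := by
        apply finVal_eq k arr memo i hi hi1
        intro j hj hij
        exact getD_of_GoodM k arr memo hg _ (hchild j hj hij) hij
      refine ⟨1, PySem.Dict.insert memo (i : Int) (finVal k arr memo (i : Int)), ?_,
        GoodM_insert k arr memo hg i hi _ hval, ?_, ?_, ?_, ?_⟩
      · have hfr := UCount_insert_fresh arr.length memo i (finVal k arr memo (i : Int)) hi hc'
        have hle : UCount arr.length (PySem.Dict.insert memo (i : Int)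
            (finVal k arr memo (i : Int))) ≤ UCount arr.length memo := by omega
        have := Nat.mul_le_mul_left (k.toNat + 2) hle
        omega
      · intro x hx
        rw [PySem.Dict.contains_insert, hx]
        simp
      · intro x hx
        rw [PySem.Dict.contains_insert] at hx
        rcases Bool.or_eq_true_iff.1 hx with h | h
        · exact Or.inr ⟨i, le_refl i, by exact_mod_cast eq_of_beq h⟩
        · exact Or.inl h
      · exact PySem.Dict.contains_insert_self _ _ _
      · intro st g
        rw [Nat.add_comm, runB_succ, if_neg (by rw [hc']; simp), if_pos hpe]
    · -- children pending: push them, recurse, then finalize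
      have hPmem : ∀ c ∈ (pendingOf k memo (i : Int)).reverse,
          ∃ t : Nat, c = (t : Int) ∧ t < i ∧ PySem.Dict.contains memo c = false := by
        intro c hcmem
        rw [List.mem_reverse] at hcmem
        obtain ⟨j, hj, rfl, hij, hfr⟩ := (mem_pendingOf k memo (i : Int) c).1 hcmem
        have hj1 : 1 ≤ j := ((PySem.List.mem_pyRange_one).1 hj).1
        exact ⟨((i : Int) - j).toNat, by omega, by omega, hfr⟩
      -- process a list of already-analyzed children indices
      have runList : ∀ cs : List Int, (∀ c ∈ cs, ∃ t : Nat, c = (t : Int) ∧ t < i) →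
          ∀ m1, GoodM k arr m1 → ∃ f2 m2,
            f2 + (k.toNat + 2) * UCount arr.length m2
              ≤ cs.length + (k.toNat + 2) * UCount arr.length m1
            ∧ GoodM k arr m2
            ∧ (∀ x, PySem.Dict.contains m1 x = true → PySem.Dict.contains m2 x = true)
            ∧ (∀ x, PySem.Dict.contains m2 x = true →
                PySem.Dict.contains m1 x = true ∨ ∃ t : Nat, t < i ∧ x = (t : Int))
            ∧ (∀ c ∈ cs, PySem.Dict.contains m2 c = true)
            ∧ ∀ st g, runB k arr (f2 + g) (m1, cs ++ st) = runB k arr g (m2, st) := by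
        intro cs
        induction cs with
        | nil =>
          intro _ m1 hg1
          exact ⟨0, m1, by omega, hg1, fun x h => h, fun x h => Or.inl h,
            by simp, fun st g => by rw [Nat.zero_add, List.nil_append]⟩
        | cons c cs ihcs =>
          intro hcs m1 hg1
          obtain ⟨t, rfl, hti⟩ := hcs c List.mem_cons_self
          obtain ⟨f1, m2, hb1, hg2, hmono1, hnew1, hct, hrun1⟩ :=
            IH t hti (by omega) m1 hg1
          obtain ⟨f2, m3, hb2, hg3, hmono2, hnew2, hcs3, hrun2⟩ :=
            ihcs (fun c hcm => hcs c (List.mem_cons_of_mem _ hcm)) m2 hg2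
          refine ⟨f1 + f2, m3, ?_, hg3, fun x hx => hmono2 x (hmono1 x hx), ?_, ?_, ?_⟩
          · have hx1 := hb1
            have hx2 := hb2
            generalize (k.toNat + 2) * UCount arr.length m1 = A at hx1 ⊢
            generalize (k.toNat + 2) * UCount arr.length m2 = B at hx1 hx2
            generalize (k.toNat + 2) * UCount arr.length m3 = C at hx2 ⊢
            simp only [List.length_cons]
            omega
          · intro x hx
            rcases hnew2 x hx with h | h
            · rcases hnew1 x h with h' | ⟨u, hu, hxu⟩
              · exact Or.inl h'
              · exact Or.inr ⟨u, by omega, hxu⟩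
            · exact Or.inr h
          · intro c' hc'mem
            rcases List.mem_cons.1 hc'mem with rfl | hmem
            · exact hmono2 _ hct
            · exact hcs3 c' hmem
          · intro st g
            rw [List.cons_append, show f1 + f2 + g = f1 + (f2 + g) from by omega,
              hrun1 (cs ++ st) (f2 + g), hrun2 st g]
      obtain ⟨f2, m2, hb2, hg2, hmono2, hnew2, hallP, hrun2⟩ :=
        runList ((pendingOf k memo (i : Int)).reverse)
          (fun c hcm => (hPmem c hcm).imp (fun t ht => ⟨ht.1, ht.2.1⟩)) memo hg
      have hci2 : PySem.Dict.contains m2 (i : Int) = false := by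
        by_contra hcc
        have hcc' : PySem.Dict.contains m2 (i : Int) = true := by
          revert hcc; cases PySem.Dict.contains m2 (i : Int) <;> simp
        rcases hnew2 _ hcc' with h | ⟨t, hti, hxt⟩
        · rw [h] at hc'; cases hc'
        · have : t = i := by exact_mod_cast hxt.symm
          omega
      have hchild2 : ∀ j ∈ PySem.List.pyRange 1 (k + 1) 1, (i : Int) - j ≥ 0 →
          PySem.Dict.contains m2 ((i : Int) - j) = true := by
        intro j hj hij
        cases hcm : PySem.Dict.contains memo ((i : Int) - j) with
        | true => exact hmono2 _ hcm
        | false =>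
          apply hallP
          rw [List.mem_reverse]
          exact (mem_pendingOf k memo (i : Int) _).2 ⟨j, hj, rfl, hij, hcm⟩
      have hpend2 : pendingOf k m2 (i : Int) = [] := by
        unfold pendingOf
        rw [List.filterMap_eq_nil_iff]
        intro j hj
        rw [if_neg]
        rintro ⟨hij, hfr⟩
        rw [hchild2 j hj hij] at hfr
        cases hfr
      have hval : finVal k arr m2 (i : Int) = (Dl k arr (arr.length - 1)).getD i none := by
        apply finVal_eq k arr m2 i hi hi1
        intro j hj hij
        exact getD_of_GoodM k arr m2 hg2 _ (hchild2 j hj hij) hij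
      refine ⟨f2 + 2, PySem.Dict.insert m2 (i : Int) (finVal k arr m2 (i : Int)), ?_,
        GoodM_insert k arr m2 hg2 i hi _ hval, ?_, ?_, ?_, ?_⟩
      · have hfr := UCount_insert_fresh arr.length m2 i (finVal k arr m2 (i : Int)) hi hci2
        have hlp : (pendingOf k memo (i : Int)).reverse.length ≤ k.toNat := by
          rw [List.length_reverse]
          exact length_pendingOf_le k memo (i : Int)
        have hmul : (k.toNat + 2) * UCount arr.length (PySem.Dict.insert m2 (i : Int)
              (finVal k arr m2 (i : Int))) + (k.toNat + 2)
            ≤ (k.toNat + 2) * UCount arr.length m2 := by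
          calc (k.toNat + 2) * UCount arr.length (PySem.Dict.insert m2 (i : Int)
                  (finVal k arr m2 (i : Int))) + (k.toNat + 2)
              = (k.toNat + 2) * (UCount arr.length (PySem.Dict.insert m2 (i : Int)
                  (finVal k arr m2 (i : Int))) + 1) := by ring
            _ ≤ (k.toNat + 2) * UCount arr.length m2 := Nat.mul_le_mul_left _ hfr
        generalize (k.toNat + 2) * UCount arr.length memo = A at hb2 ⊢
        generalize (k.toNat + 2) * UCount arr.length m2 = B at hb2 hmul
        generalize (k.toNat + 2) * UCount arr.length (PySem.Dict.insert m2 (i : Int)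
          (finVal k arr m2 (i : Int))) = C at hmul ⊢
        omega
      · intro x hx
        rw [PySem.Dict.contains_insert, hmono2 x hx]
        simp
      · intro x hx
        rw [PySem.Dict.contains_insert] at hx
        rcases Bool.or_eq_true_iff.1 hx with h | h
        · exact Or.inr ⟨i, le_refl i, by exact_mod_cast eq_of_beq h⟩
        · rcases hnew2 x h with h' | ⟨t, hti, hxt⟩
          · exact Or.inl h'
          · exact Or.inr ⟨t, by omega, hxt⟩
      · exact PySem.Dict.contains_insert_self _ _ _
      · intro st g
        have hfi : f2 + 2 + g = (f2 + (1 + g)) + 1 := by omega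
        rw [hfi, runB_succ, if_neg (by rw [hc']; simp),
          if_neg (by rw [Bool.not_eq_true, List.isEmpty_eq_false_iff]
                     exact fun h => hpe (by rw [h]; rfl)),
          hrun2 ((i : Int) :: st) (1 + g), Nat.add_comm 1 g, runB_succ,
          if_neg (by rw [hci2]; simp), if_pos (by rw [hpend2]; rfl)]

-- ===== VERDICT (by name: the statement is the Claim_ definition above) =====
theorem minimizeCost_spec : Claim_equal_minimizeCost := by
  intro k arr _hdom hpre
  obtain ⟨hne, -⟩ := hpre
  have h1 : 0 < arr.length := List.length_pos_iff.2 hne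
  unfold Spec_minimizeCost
  have hA : minimizeCost k arr
      = ((Dl k arr (arr.length - 1)).getD (arr.length - 1) none).getD 0 := by
    simp only [minimizeCost]
    rw [show (arr.length : Int) = ((arr.length - 1 : Nat) : Int) + 1 by omega,
      A_loop k arr hne (arr.length - 1) (le_refl _),
      show arr.length - 1 - (arr.length - 1) = 0 from by omega,
      List.replicate_zero, List.append_nil,
      PySem.List.pyGet?_neg_one, List.getLast?_eq_getElem?, length_Dl,
      show arr.length - 1 + 1 - 1 = arr.length - 1 from by omega,
      List.getD_eq_getElem?_getD]
  have hg0 : GoodM k arr (PySem.Dict.insert PySem.Dict.empty 0 (some 0)) := by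
    constructor
    · exact PySem.Dict.contains_insert_self _ _ _
    · intro x hx
      have hx0 : x = 0 := by
        rw [PySem.Dict.contains_insert, PySem.Dict.contains_empty] at hx
        rcases Bool.or_eq_true_iff.1 hx with h | h
        · exact eq_of_beq h
        · cases h
      refine ⟨0, by exact_mod_cast hx0, h1, ?_⟩
      rw [hx0, PySem.Dict.get?_insert_self, getD_Dl_zero]
  obtain ⟨f, memo', hb, hg', hmono, hnew, hcont, hrun⟩ :=
    run_one k arr (arr.length - 1) (by omega) (PySem.Dict.insert PySem.Dict.empty 0 (some 0)) hg0
  have hB : minimizeCost_alt k arr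
      = ((Dl k arr (arr.length - 1)).getD (arr.length - 1) none).getD 0 := by
    simp only [minimizeCost_alt]
    have hcast : (arr.length : Int) - 1 = (((arr.length - 1 : Nat)) : Int) := by omega
    have hfuel : f ≤ (arr.length + 1) * (k.toNat + 2) + 2 := by
      have hU := UCount_le arr.length (PySem.Dict.insert PySem.Dict.empty 0 (some 0))
      have : (k.toNat + 2) * UCount arr.length (PySem.Dict.insert PySem.Dict.empty 0 (some 0))
          ≤ (k.toNat + 2) * arr.length := Nat.mul_le_mul_left _ hU
      have hcomm : (arr.length + 1) * (k.toNat + 2) = (k.toNat + 2) * (arr.length + 1) := by ring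
      have hexp : (k.toNat + 2) * (arr.length + 1)
          = (k.toNat + 2) * arr.length + (k.toNat + 2) := by ring
      omega
    have hsplit : (arr.length + 1) * (k.toNat + 2) + 2
        = f + ((arr.length + 1) * (k.toNat + 2) + 2 - f) := by omega
    rw [hcast, hsplit, hrun [] _, runB_nil]
    obtain ⟨t, hxt, htn, hval⟩ := hg'.2 _ hcont
    have ht : t = arr.length - 1 := by
      have : ((arr.length - 1 : Nat) : Int) = (t : Int) := hxt
      exact_mod_cast this.symm
    rw [hval, ht]
    rfl
  rw [hA, hB]
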